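-- pv_equiv track=rewrite | github.com/FDUCSLG/PRML-2019Spring-FDU | assignment-2/16307130075/source.py | sub_dict
-- ===== SOURCE A (Python) =====
-- def sub_dict(dic):
--     del_key = []
--     for k in dic.keys():
--         if dic[k] < 10:
--             del_key.append(k)
--     for k in del_key:
--         dic.pop(k)
--     return dic
-- ===== SOURCE B (Python) =====
-- def sub_dict(dic):
--     # Fixed-point deletion: repeatedly scan for the first entry with value < 10
--     # and delete it, until no such entry remains.
--     while True:
--         bad = next((k for k, v in dic.items() if v < 10), None)
--         if bad is None:
--             return dic
--         del dic[bad]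
-- ===== Notes on version B (the rewrite author's own statement) =====
-- stated objective: alternative
-- what changed: B replaces A's two-phase collect-keys-then-pop pass by a fixed-point loop that rescans the dict for the first value < 10 and deletes it until none remains.
import Mathlib
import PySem

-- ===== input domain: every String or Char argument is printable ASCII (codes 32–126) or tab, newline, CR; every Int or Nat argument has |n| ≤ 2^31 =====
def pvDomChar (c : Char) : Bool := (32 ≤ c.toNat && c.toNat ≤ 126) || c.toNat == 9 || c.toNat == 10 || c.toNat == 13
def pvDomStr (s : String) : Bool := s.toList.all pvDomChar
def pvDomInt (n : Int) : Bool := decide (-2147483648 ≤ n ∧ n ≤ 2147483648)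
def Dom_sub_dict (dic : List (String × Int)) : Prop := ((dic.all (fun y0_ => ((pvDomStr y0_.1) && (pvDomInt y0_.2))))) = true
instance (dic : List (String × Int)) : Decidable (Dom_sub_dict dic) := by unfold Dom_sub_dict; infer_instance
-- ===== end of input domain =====

-- B replaces A's collect-keys-then-pop pass by a fixed-point loop that rescans for the first
-- value < 10 and deletes it until none remains; equivalence is about the returned value
-- (both Pythons mutate and return the same dict object).
-- ===== PORT A =====
-- dic[k]: first (unique, under Pre_) entry with key k; k always comes from dic.keys() here
def pvLookup (dic : List (String × Int)) (k : String) : Int :=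
  match dic.find? (fun kv => kv.1 == k) with
  | some kv => kv.2
  | none => 0

def sub_dict (dic : List (String × Int)) : List (String × Int) :=
  -- del_key = []; for k in dic.keys(): if dic[k] < 10: del_key.append(k)
  let delKey := dic.foldl (fun acc kv => if pvLookup dic kv.1 < 10 then acc ++ [kv.1] else acc) ([] : List String)
  -- for k in del_key: dic.pop(k)   (pop removes the unique entry with key k)
  delKey.foldl (fun d k => d.eraseP (fun kv => kv.1 == k)) dic

-- ===== PORT B =====
-- while True: bad = first key with value < 10 (None if absent); if None return dic; del dic[bad]
def sub_dict_alt (dic : List (String × Int)) : List (String × Int) :=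
  match _h : dic.find? (fun kv => decide (kv.2 < 10)) with
  | none => dic
  | some kv => sub_dict_alt (dic.eraseP (fun p => p.1 == kv.1))
termination_by dic.length
decreasing_by
  have hmem : kv ∈ dic := List.mem_of_find?_eq_some _h
  have hlen := List.length_eraseP_of_mem (p := fun p : String × Int => p.1 == kv.1) hmem (by simp)
  have hpos : 0 < dic.length := List.length_pos_of_mem hmem
  omega

-- ===== PRECONDITION & SPEC =====
-- Pre_: the association list stands for a Python dict, whose keys are necessarily distinct;
-- duplicate-key lists correspond to no Python input of A.
def Pre_sub_dict (dic : List (String × Int)) : Prop := (dic.map Prod.fst).Nodup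
instance (dic : List (String × Int)) : Decidable (Pre_sub_dict dic) := by unfold Pre_sub_dict; infer_instance
def pvWitness_sub_dict : (List (String × Int)) := [("a", 5), ("b", 12), ("c", -3)]
def Spec_sub_dict (dic : List (String × Int)) (out : List (String × Int)) : Prop := out = sub_dict_alt dic
instance (dic : List (String × Int)) (out : List (String × Int)) : Decidable (Spec_sub_dict dic out) := by unfold Spec_sub_dict; infer_instance

-- ===== CLAIM (what is proved, stated in full; the proofs are below) =====
def Claim_equal_sub_dict : Prop := ∀ (dic : List (String × Int)), Dom_sub_dict dic → Pre_sub_dict dic → Spec_sub_dict dic (sub_dict dic)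

-- ===== LEMMAS AND PROOFS =====

-- lookup of a member key under Nodup keys yields that member's value
lemma pvLookup_of_mem (dic : List (String × Int)) (kv : String × Int)
    (hnd : (dic.map Prod.fst).Nodup) (hm : kv ∈ dic) : pvLookup dic kv.1 = kv.2 := by
  induction dic with
  | nil => cases hm
  | cons hd tl ih =>
    simp only [List.map_cons, List.nodup_cons] at hnd
    rcases List.mem_cons.mp hm with heq | hm
    · subst heq; simp [pvLookup, List.find?]
    · have hmem : kv.1 ∈ tl.map Prod.fst := List.mem_map_of_mem hm
      have hne : ¬ ((fun kv' : String × Int => kv'.1 == kv.1) hd = true) := by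
        simp only [beq_iff_eq]
        exact fun h => hnd.1 (h ▸ hmem)
      have hskip : List.find? (fun kv' : String × Int => kv'.1 == kv.1) (hd :: tl)
          = List.find? (fun kv' : String × Int => kv'.1 == kv.1) tl :=
        List.find?_cons_of_neg hne
      simp only [pvLookup] at ih ⊢
      rw [hskip]
      exact ih hnd.2 hm

-- the first loop of A collects exactly the keys of the small entries
lemma delKey_eq (dic : List (String × Int)) (hnd : (dic.map Prod.fst).Nodup) :
    dic.foldl (fun acc kv => if pvLookup dic kv.1 < 10 then acc ++ [kv.1] else acc) ([] : List String)
      = (dic.filter (fun kv => decide (kv.2 < 10))).map Prod.fst := by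
  have hcongr := List.foldl_ext
      (fun (acc : List String) (kv : String × Int) =>
        if pvLookup dic kv.1 < 10 then acc ++ [kv.1] else acc)
      (fun (acc : List String) (kv : String × Int) =>
        if (fun kv : String × Int => decide (kv.2 < 10)) kv then acc ++ [kv.1] else acc)
      ([] : List String) (l := dic)
      (fun acc kv hkv => by
        simp only [pvLookup_of_mem dic kv hnd hkv, decide_eq_true_eq])
  rw [hcongr]
  simpa using PySem.List.foldl_append_if (fun kv : String × Int => decide (kv.2 < 10)) Prod.fst dic []

-- erasing keys absent from the head commutes with cons
lemma foldl_erase_cons (ks : List String) (kv : String × Int) (d : List (String × Int))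
    (h : kv.1 ∉ ks) :
    ks.foldl (fun d k => d.eraseP (fun kv => kv.1 == k)) (kv :: d)
      = kv :: ks.foldl (fun d k => d.eraseP (fun kv => kv.1 == k)) d := by
  induction ks generalizing d with
  | nil => rfl
  | cons k ks ih =>
    simp only [List.mem_cons, not_or] at h
    have hne : List.eraseP (fun kv' : String × Int => kv'.1 == k) (kv :: d)
        = kv :: List.eraseP (fun kv' : String × Int => kv'.1 == k) d := by
      simp [h.1]
    simp only [List.foldl_cons, hne]
    exact ih _ h.2

-- A: popping the keys of the small entries leaves exactly the large entries
lemma foldl_erase_filter (dic : List (String × Int)) (hnd : (dic.map Prod.fst).Nodup) :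
    ((dic.filter (fun kv => decide (kv.2 < 10))).map Prod.fst).foldl
        (fun d k => d.eraseP (fun kv => kv.1 == k)) dic
      = dic.filter (fun kv => !(decide (kv.2 < 10))) := by
  induction dic with
  | nil => rfl
  | cons hd tl ih =>
    simp only [List.map_cons, List.nodup_cons] at hnd
    by_cases hbad : hd.2 < 10
    · have herase : List.eraseP (fun kv : String × Int => kv.1 == hd.1) (hd :: tl) = tl := by
        simp
      simp only [List.filter_cons, hbad, decide_true, if_pos, List.map_cons, List.foldl_cons,
        herase, Bool.not_true, if_neg, Bool.false_eq_true, not_false_eq_true]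
      exact ih hnd.2
    · have hkeys : hd.1 ∉ ((tl.filter (fun kv => decide (kv.2 < 10))).map Prod.fst) := by
        intro hmem
        apply hnd.1
        rcases List.mem_map.mp hmem with ⟨kv, hkv, hfst⟩
        exact hfst ▸ List.mem_map_of_mem (List.mem_of_mem_filter hkv)
      simp only [List.filter_cons, hbad, decide_false, Bool.not_false, if_pos,
        Bool.false_eq_true, if_neg, not_false_eq_true]
      rw [foldl_erase_cons _ _ _ hkeys]
      rw [ih hnd.2]

-- erasing a bad-keyed entry (under nodup keys) does not change the kept entries
lemma filter_eraseP_key (dic : List (String × Int)) (kv : String × Int)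
    (hnd : (dic.map Prod.fst).Nodup) (hm : kv ∈ dic) (hbad : kv.2 < 10) :
    (dic.eraseP (fun p => p.1 == kv.1)).filter (fun p => !(decide (p.2 < 10)))
      = dic.filter (fun p => !(decide (p.2 < 10))) := by
  induction dic with
  | nil => cases hm
  | cons hd tl ih =>
    simp only [List.map_cons, List.nodup_cons] at hnd
    rcases List.mem_cons.mp hm with heq | hm
    · subst heq
      simp [List.eraseP_cons_of_pos, hbad]
    · have hne : ¬ (hd.1 = kv.1) := by
        intro h
        exact hnd.1 (h ▸ List.mem_map_of_mem hm)
      have herase : List.eraseP (fun p : String × Int => p.1 == kv.1) (hd :: tl)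
          = hd :: List.eraseP (fun p : String × Int => p.1 == kv.1) tl := by
        simp [hne]
      rw [herase]
      simp only [List.filter_cons]
      rw [ih hnd.2 hm]

-- B's fixed-point loop computes the kept entries
lemma sub_dict_alt_eq_filter (dic : List (String × Int)) (hnd : (dic.map Prod.fst).Nodup) :
    sub_dict_alt dic = dic.filter (fun p => !(decide (p.2 < 10))) := by
  induction hlen : dic.length using Nat.strong_induction_on generalizing dic with
  | _ n ih =>
    rw [sub_dict_alt.eq_def]
    split
    · next hfind =>
      have hall := List.find?_eq_none.mp hfind
      symm
      apply List.filter_eq_self.mpr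
      intro p hp
      have := hall p hp
      simp only [decide_eq_true_eq] at this
      simp [this]
    · next kv hfind =>
      have hm : kv ∈ dic := List.mem_of_find?_eq_some hfind
      have hbad : kv.2 < 10 := by simpa using List.find?_some hfind
      have hlen' := List.length_eraseP_of_mem (p := fun p : String × Int => p.1 == kv.1) hm (by simp)
      have hpos : 0 < dic.length := List.length_pos_of_mem hm
      have hnd' : ((dic.eraseP (fun p => p.1 == kv.1)).map Prod.fst).Nodup :=
        ((List.eraseP_sublist).map Prod.fst).nodup hnd
      rw [ih ((dic.eraseP (fun p => p.1 == kv.1)).length) (by omega) _ hnd' rfl]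
      exact filter_eraseP_key dic kv hnd hm hbad

-- ===== VERDICT (by name: the statement is the Claim_ definition above) =====
theorem sub_dict_spec : Claim_equal_sub_dict := by
  intro dic _ hpre
  unfold Spec_sub_dict sub_dict
  rw [delKey_eq dic hpre, foldl_erase_filter dic hpre, sub_dict_alt_eq_filter dic hpre]
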